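-- pv_equiv track=rewrite | github.com/kohoutekkk/advent_of_code_2021 | day_3/task_2.py | filter_to_last
-- ===== SOURCE A (Python) =====
-- def filter_to_last(values, most=True, ind=0):
--     ones = []
--     zeros = []
--
--     for value in values:
--         if value[ind] == '1':
--             ones.append(value)
--         else:
--             zeros.append(value)
--     zl = len(zeros)
--     ol = len(ones)
--
--     if most:
--         if zl > ol:
--             out = zeros
--         else:
--             out = ones
--
--     else:
--         if ol < zl:
--             out = ones
--         else:
--             out = zeros
--
--     if len(out) == 1:
--         return out
--     else:
--         return filter_to_last(out, most=most, ind=ind + 1)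
-- ===== SOURCE B (Python) =====
-- def filter_to_last(values, most=True, ind=0):
--     while len(values) != 1:
--         n = len(values)
--         c1 = sum(1 for v in values if v[ind] == '1')
--         keep_one = (2 * c1 >= n) if most else (2 * c1 < n)
--         values = [v for v in values if (v[ind] == '1') == keep_one]
--         ind += 1
--     return values
-- ===== Notes on version B (the rewrite author's own statement) =====
-- stated objective: idiomatic
-- what changed: B replaces A's tail recursion building two appended lists per level with an iterative while-loop that counts the '1' bits once and keeps the majority/minority side by a single filter against an arithmetic threshold (2*c1 >= n).
-- outside the precondition, e.g. on filter_to_last(['00', '00', '10', '11'], True, 0): A returns ['11'], B returns ['11']; on filter_to_last(['000', '010', '100', '101'], False, 0): A returns ['000'], B returns ['000']; on filter_to_last(['a', '1cyca y', '1c1zb91'], True, 0): A returns ['1c1zb91'], B returns ['1c1zb91']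
-- crash fix: On a single-element list A raises (RecursionError in least mode, where it recurses on the empty kept side forever; IndexError in most mode with ind outside the code) while B's loop exits immediately and returns the singleton, the only sensible rating for a one-code report. — e.g. on filter_to_last(["10"], false, 0): A raises RecursionError, B returns ["10"]
import Mathlib
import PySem

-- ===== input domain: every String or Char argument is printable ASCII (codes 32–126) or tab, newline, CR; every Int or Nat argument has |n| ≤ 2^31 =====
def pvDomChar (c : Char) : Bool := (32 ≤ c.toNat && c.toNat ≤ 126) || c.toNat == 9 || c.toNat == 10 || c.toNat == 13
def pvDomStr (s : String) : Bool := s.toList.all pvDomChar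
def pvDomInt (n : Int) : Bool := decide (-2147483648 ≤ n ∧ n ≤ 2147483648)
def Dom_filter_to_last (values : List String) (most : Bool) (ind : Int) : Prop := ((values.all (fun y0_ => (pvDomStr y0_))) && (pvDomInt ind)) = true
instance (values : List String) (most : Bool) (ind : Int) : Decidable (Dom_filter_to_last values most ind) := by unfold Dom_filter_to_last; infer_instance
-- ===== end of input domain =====

-- B replaces A's tail recursion (two appended lists per level) with an iterative loop that
-- counts '1' bits once and keeps the chosen side by a single filter against the threshold 2*c1 >= n.


-- ===== PORT A =====
-- value[ind] == '1'  (the IndexError path — pyGet? = none — is unreachable inside Pre_; none ≠ some '1')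
def pvBit (v : String) (ind : Int) : Bool := PySem.Str.pyGet? v ind == some '1'

-- one level of A: build ones/zeros by the for-loop (appends), then pick `out` by A's branch order
def pvStepA (values : List String) (most : Bool) (ind : Int) : List String :=
  let oz := values.foldl
    (fun (acc : List String × List String) v =>
      if pvBit v ind then (acc.1 ++ [v], acc.2) else (acc.1, acc.2 ++ [v]))
    ([], [])
  let zl := oz.2.length
  let ol := oz.1.length
  if most then (if zl > ol then oz.2 else oz.1)
  else (if ol < zl then oz.1 else oz.2)

-- fuel bound (artifact of totalising the Python recursion; ample inside Pre_)
def pvFuel (values : List String) (ind : Int) : Nat :=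
  values.foldl (fun m v => max m v.toList.length) 0 + ind.natAbs + 1

def pvLoopA : Nat → List String → Bool → Int → Option (List String)
  | 0, _, _, _ => none
  | f + 1, values, most, ind =>
    let out := pvStepA values most ind
    if out.length == 1 then some out else pvLoopA f out most (ind + 1)

def filter_to_last (values : List String) (most : Bool) (ind : Int) : List String :=
  (pvLoopA (pvFuel values ind) values most ind).getD values

-- ===== PORT B =====
-- one level of B: count the '1' bits, decide the kept bit arithmetically, single filter
def pvStepB (values : List String) (most : Bool) (ind : Int) : List String :=
  let n := values.length
  let c1 := values.countP (fun v => pvBit v ind)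
  let keepOne := if most then decide (2 * c1 ≥ n) else decide (2 * c1 < n)
  values.filter (fun v => pvBit v ind == keepOne)

def pvLoopB : Nat → List String → Bool → Int → Option (List String)
  | 0, _, _, _ => none
  | f + 1, values, most, ind =>
    if values.length == 1 then some values
    else pvLoopB f (pvStepB values most ind) most (ind + 1)

def filter_to_last_alt (values : List String) (most : Bool) (ind : Int) : List String :=
  (pvLoopB (pvFuel values ind + 1) values most ind).getD values

-- ===== PRECONDITION & SPEC =====
def pvBits (v : String) : List Bool := v.toList.map (fun c => c == '1')
def pvBitN (v : String) (j : Nat) : Bool := (pvBits v).getD j false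
def pvSeg (v : String) (i j : Nat) : List Bool := ((pvBits v).drop i).take (j - i)
def pvLenMin (values : List String) : Nat :=
  values.foldl (fun m v => min m v.toList.length) (values.headD "").toList.length

-- Pre_ restricts the claim to A's natural domain, where A returns a value: either the first
-- partition already isolates a single code, or the input is a well-formed diagnostic report —
-- nonempty, ind inside every code up to the shortest length L, bit-suffixes on [ind, L) pairwise
-- distinct, and in least mode additionally 0 ≤ ind, ≥ 2 codes and every group of codes agreeing so
-- far splitting at its next column (a unanimous column makes A's least mode recurse on [] forever);
-- outside Pre_ A raises IndexError or RecursionError, except for some malformed lists (duplicate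
-- bit-patterns or ragged lengths) that still happen to reach a single code, on which B returns the
-- same value as A (see the cited examples).
def Pre_filter_to_last (values : List String) (most : Bool) (ind : Int) : Prop :=
  (values ≠ [] ∧
    (∀ v ∈ values, -(v.toList.length : Int) ≤ ind ∧ ind < (v.toList.length : Int)) ∧
    (if most then
        (if values.countP (fun v => PySem.Str.pyGet? v ind == some '1')
            < values.length - values.countP (fun v => PySem.Str.pyGet? v ind == some '1') then
          values.length - values.countP (fun v => PySem.Str.pyGet? v ind == some '1')
        else values.countP (fun v => PySem.Str.pyGet? v ind == some '1'))
      else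
        (if values.countP (fun v => PySem.Str.pyGet? v ind == some '1')
            < values.length - values.countP (fun v => PySem.Str.pyGet? v ind == some '1') then
          values.countP (fun v => PySem.Str.pyGet? v ind == some '1')
        else values.length - values.countP (fun v => PySem.Str.pyGet? v ind == some '1'))) = 1) ∨
  (values ≠ [] ∧
    ind < (pvLenMin values : Int) ∧ -(pvLenMin values : Int) ≤ ind ∧
    (values.map (fun v => pvSeg v ind.toNat (pvLenMin values))).Nodup ∧
    (most = false → 0 ≤ ind ∧ 2 ≤ values.length ∧
      ∀ j < pvLenMin values, ind.toNat ≤ j → ∀ u ∈ values,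
        2 ≤ (values.filter (fun v => pvSeg v ind.toNat j == pvSeg u ind.toNat j)).length →
        ∃ v ∈ values, pvSeg v ind.toNat j = pvSeg u ind.toNat j ∧ pvBitN v j ≠ pvBitN u j))

instance (values : List String) (most : Bool) (ind : Int) : Decidable (Pre_filter_to_last values most ind) := by
  unfold Pre_filter_to_last; infer_instance

def pvWitness_filter_to_last : List String × Bool × Int := (["01", "10"], true, 0)

-- On a single-element list A raises — RecursionError in least mode (it recurses on the empty kept
-- side forever), IndexError in most mode with ind out of the code's range — while B's loop exits at
-- once and returns the singleton, which is the only sensible rating for a one-code report.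
def Raises_filter_to_last (values : List String) (most : Bool) (ind : Int) : Prop :=
  values.length = 1 ∧
    (most = false ∨
      ¬(-(((values.headD "").toList.length : Int)) ≤ ind ∧
        ind < ((values.headD "").toList.length : Int)))

instance (values : List String) (most : Bool) (ind : Int) : Decidable (Raises_filter_to_last values most ind) := by
  unfold Raises_filter_to_last; infer_instance

def pvRaiseWitness_filter_to_last : List String × Bool × Int := (["10"], false, 0)
def pvRaiseWitnessOut_filter_to_last : List String := ["10"]

def Spec_filter_to_last (values : List String) (most : Bool) (ind : Int) (out : List String) : Prop := out = filter_to_last_alt values most ind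
instance (values : List String) (most : Bool) (ind : Int) (out : List String) : Decidable (Spec_filter_to_last values most ind out) := by unfold Spec_filter_to_last; infer_instance

-- ===== CLAIM (what is proved, stated in full; the proofs are below) =====
def Claim_equal_filter_to_last : Prop := ∀ (values : List String) (most : Bool) (ind : Int), Dom_filter_to_last values most ind → Pre_filter_to_last values most ind → Spec_filter_to_last values most ind (filter_to_last values most ind)

def Claim_raises_filter_to_last : Prop := (∀ (values : List String) (most : Bool) (ind : Int), Dom_filter_to_last values most ind → Raises_filter_to_last values most ind → ¬ Pre_filter_to_last values most ind) ∧ (Dom_filter_to_last (pvRaiseWitness_filter_to_last.1) (pvRaiseWitness_filter_to_last.2.1) (pvRaiseWitness_filter_to_last.2.2) ∧ Raises_filter_to_last (pvRaiseWitness_filter_to_last.1) (pvRaiseWitness_filter_to_last.2.1) (pvRaiseWitness_filter_to_last.2.2) ∧ filter_to_last_alt (pvRaiseWitness_filter_to_last.1) (pvRaiseWitness_filter_to_last.2.1) (pvRaiseWitness_filter_to_last.2.2) = pvRaiseWitnessOut_filter_to_last)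

-- ===== LEMMAS AND PROOFS =====
theorem pvBit_natCast (v : String) (i : Nat) : pvBit v (i : Int) = (v.toList[i]? == some '1') := by
  simp [pvBit]

theorem pvBitN_eq (v : String) (i : Nat) (h : i < v.toList.length) :
    pvBitN v i = (v.toList[i]? == some '1') := by
  simp [pvBitN, pvBits, List.getD, List.getElem?_map, List.getElem?_eq_getElem h]

theorem pvFoldPair (p : String → Bool) : ∀ (l o z : List String),
    l.foldl (fun (acc : List String × List String) v =>
      if p v then (acc.1 ++ [v], acc.2) else (acc.1, acc.2 ++ [v])) (o, z)
    = (o ++ l.filter p, z ++ l.filter (fun v => !p v)) := by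
  intro l
  induction l with
  | nil => simp
  | cons a l ih =>
    intro o z
    by_cases h : p a <;> simp [h, ih, List.filter_cons]

theorem pvSeg_cons (v : String) (i j : Nat) (hij : i < j) (hlen : i < v.toList.length) :
    pvSeg v i j = pvBitN v i :: pvSeg v (i + 1) j := by
  have hlen' : i < (pvBits v).length := by simpa [pvBits] using hlen
  have h1 : (pvBits v).drop i = (pvBits v)[i] :: (pvBits v).drop (i + 1) :=
    List.drop_eq_getElem_cons hlen'
  have h2 : pvBitN v i = (pvBits v)[i] := List.getD_eq_getElem _ _ hlen'
  have h3 : j - i = (j - (i + 1)) + 1 := by omega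
  rw [pvSeg, pvSeg, h1, h3, List.take_succ_cons, h2]

theorem pvFilter_true (l : List String) (p : String → Bool) :
    l.filter (fun v => p v == true) = l.filter p := by
  simp

theorem pvFilter_false (l : List String) (p : String → Bool) :
    l.filter (fun v => p v == false) = l.filter (fun v => !p v) := by
  apply List.filter_congr
  intro v _
  cases h : p v <;> simp [h]

theorem pvStep_eq (values : List String) (most : Bool) (ind : Int) :
    pvStepA values most ind = pvStepB values most ind := by
  unfold pvStepA pvStepB
  simp only [pvFoldPair, List.nil_append]
  have hol : (values.filter (fun v => pvBit v ind)).length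
      = values.countP (fun v => pvBit v ind) :=
    List.countP_eq_length_filter.symm
  have hzl : (values.filter (fun v => !pvBit v ind)).length
      = values.countP (fun v => !pvBit v ind) :=
    List.countP_eq_length_filter.symm
  have hsum : values.countP (fun v => pvBit v ind)
      + values.countP (fun v => !pvBit v ind) = values.length := by
    simpa using (values.length_eq_countP_add_countP (p := (fun v => pvBit v ind))).symm
  cases most with
  | true =>
    by_cases hk : 2 * values.countP (fun v => pvBit v ind) ≥ values.length
    · have h2 : ¬ ((values.filter (fun v => !pvBit v ind)).length
          > (values.filter (fun v => pvBit v ind)).length) := by omega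
      simp [hk, h2, pvFilter_true]
    · have h2 : (values.filter (fun v => !pvBit v ind)).length
          > (values.filter (fun v => pvBit v ind)).length := by omega
      simp [hk, h2, pvFilter_false]
  | false =>
    by_cases hk : 2 * values.countP (fun v => pvBit v ind) < values.length
    · have h2 : (values.filter (fun v => pvBit v ind)).length
          < (values.filter (fun v => !pvBit v ind)).length := by omega
      simp [hk, h2, pvFilter_true]
    · have h2 : ¬ ((values.filter (fun v => pvBit v ind)).length
          < (values.filter (fun v => !pvBit v ind)).length) := by omega
      simp [hk, h2, pvFilter_false]

theorem pvStepB_singleton (v : String) (ind : Int) : pvStepB [v] true ind = [v] := by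
  cases h : pvBit v ind <;> simp [pvStepB, h]

theorem pvStepB_ne_nil_most (values : List String) (ind : Int) (hne : values ≠ []) :
    pvStepB values true ind ≠ [] := by
  unfold pvStepB
  intro hnil
  rw [List.filter_eq_nil_iff] at hnil
  by_cases hk : 2 * values.countP (fun v => pvBit v ind) ≥ values.length
  · have hall : ∀ v ∈ values, pvBit v ind = false := by
      intro v hv
      have := hnil v hv
      simp [hk] at this
      exact this
    have hc : values.countP (fun v => pvBit v ind) = 0 :=
      List.countP_eq_zero.mpr (by intro v hv; simp [hall v hv])
    have hlen : values.length ≠ 0 := by simpa using hne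
    omega
  · have hall : ∀ v ∈ values, pvBit v ind = true := by
      intro v hv
      have := hnil v hv
      simp [hk] at this
      exact this
    have hc : values.countP (fun v => pvBit v ind) = values.length :=
      List.countP_eq_length.mpr (by intro v hv; simp [hall v hv])
    have hlen : values.length ≠ 0 := by simpa using hne
    omega

theorem pvStepB_len (values : List String) (most : Bool) (ind : Int) :
    (pvStepB values most ind).length
    = (if most then
        (if values.countP (fun v => pvBit v ind)
            < values.length - values.countP (fun v => pvBit v ind)
          then values.length - values.countP (fun v => pvBit v ind)
          else values.countP (fun v => pvBit v ind))
      else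
        (if values.countP (fun v => pvBit v ind)
            < values.length - values.countP (fun v => pvBit v ind)
          then values.countP (fun v => pvBit v ind)
          else values.length - values.countP (fun v => pvBit v ind))) := by
  unfold pvStepB
  have hol : (values.filter (fun v => pvBit v ind)).length
      = values.countP (fun v => pvBit v ind) := List.countP_eq_length_filter.symm
  have hzl : (values.filter (fun v => !pvBit v ind)).length
      = values.countP (fun v => !pvBit v ind) := List.countP_eq_length_filter.symm
  have hsum : values.countP (fun v => pvBit v ind)
      + values.countP (fun v => !pvBit v ind) = values.length := by
    simpa using (values.length_eq_countP_add_countP (p := (fun v => pvBit v ind))).symm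
  cases most with
  | true =>
    by_cases hk : 2 * values.countP (fun v => pvBit v ind) ≥ values.length
    · simp only [hk, ge_iff_le, decide_true, if_true, reduceIte, pvFilter_true]
      rw [hol, if_neg (by omega)]
    · simp only [hk, ge_iff_le, decide_false, if_true, reduceIte, pvFilter_false]
      rw [hzl, if_pos (by omega)]
      omega
  | false =>
    by_cases hk : 2 * values.countP (fun v => pvBit v ind) < values.length
    · simp only [hk, decide_true, Bool.false_eq_true, if_false, reduceIte, pvFilter_true]
      rw [hol, if_pos (by omega)]
    · simp only [hk, decide_false, Bool.false_eq_true, if_false, reduceIte, pvFilter_false]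
      rw [hzl, if_neg (by omega)]
      omega

theorem pvFilter_ne_nil_of_two (values : List String) (p : String → Bool) (k : Bool)
    (u w : String) (hu : u ∈ values) (hw : w ∈ values) (hbw : p u ≠ p w) :
    values.filter (fun v => p v == k) ≠ [] := by
  intro hnil
  rw [List.filter_eq_nil_iff] at hnil
  have h1 := hnil u hu
  have h2 := hnil w hw
  cases hpu : p u <;> cases hpw : p w <;> cases k <;> simp_all

theorem pvTwo_ne (l : List String) (f : String → List Bool)
    (h : (l.map f).Nodup) (h2 : 2 ≤ l.length) : ∃ a ∈ l, ∃ b ∈ l, f a ≠ f b := by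
  cases l with
  | nil => simp at h2
  | cons a t =>
    cases t with
    | nil => simp at h2
    | cons b t2 =>
      refine ⟨a, by simp, b, by simp, ?_⟩
      have hn := (List.nodup_cons.mp h).1
      intro he
      exact hn (by simp [he])

theorem pvMain : ∀ (f : Nat) (values : List String) (most : Bool) (i L : Nat),
    values ≠ [] → i < L → (∀ v ∈ values, L ≤ v.toList.length) →
    (values.map (fun v => pvSeg v i L)).Nodup →
    (most = false → 2 ≤ values.length ∧
      (∀ j < L, i ≤ j → ∀ u ∈ values,
        2 ≤ (values.filter (fun v => pvSeg v i j == pvSeg u i j)).length →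
        ∃ v ∈ values, pvSeg v i j = pvSeg u i j ∧ pvBitN v j ≠ pvBitN u j)) →
    L - i ≤ f →
    ∃ r, pvLoopA f values most (i : Int) = some r ∧ pvLoopB (f + 1) values most (i : Int) = some r := by
  intro f
  induction f with
  | zero => intro values most i L h1 h2 _ _ _ h6; omega
  | succ f ih =>
    intro values most i L hne hiL hlen hnd hleast hfuel
    have hbit : ∀ x ∈ values, pvBitN x i = pvBit x (i : Int) := fun x hx => by
      rw [pvBitN_eq x i (lt_of_lt_of_le hiL (hlen x hx)), pvBit_natCast]
    by_cases hone : values.length = 1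
    · obtain ⟨v, rfl⟩ := List.length_eq_one_iff.mp hone
      cases most with
      | false =>
        have := (hleast rfl).1
        simp at this
      | true =>
        refine ⟨[v], ?_, ?_⟩
        · simp [pvLoopA, pvStep_eq, pvStepB_singleton]
        · simp [pvLoopB]
    · have hn2 : 2 ≤ values.length := by
        have : values.length ≠ 0 := by simpa using hne
        omega
      have houtA : pvLoopA (f + 1) values most (i : Int)
          = (if (pvStepB values most (i:Int)).length == 1 then some (pvStepB values most (i:Int))
             else pvLoopA f (pvStepB values most (i:Int)) most ((i:Int) + 1)) := by
        simp only [pvLoopA, pvStep_eq]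
      have houtB : pvLoopB (f + 1 + 1) values most (i : Int)
          = pvLoopB (f + 1) (pvStepB values most (i:Int)) most ((i:Int) + 1) := by
        simp only [pvLoopB]
        rw [if_neg (by simpa using hone)]
      set out := pvStepB values most (i : Int) with hout
      have houtf : out = values.filter
          (fun v => pvBit v (i:Int) ==
            (if most then decide (2 * values.countP (fun v => pvBit v (i:Int)) ≥ values.length)
             else decide (2 * values.countP (fun v => pvBit v (i:Int)) < values.length))) := rfl
      have hsubout : out.Sublist values := by
        rw [houtf]; exact List.filter_sublist
      have hkmem : ∀ x ∈ out, pvBit x (i:Int) =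
            (if most then decide (2 * values.countP (fun v => pvBit v (i:Int)) ≥ values.length)
             else decide (2 * values.countP (fun v => pvBit v (i:Int)) < values.length)) := by
        intro x hx
        rw [houtf] at hx
        have := List.of_mem_filter hx
        simpa using this
      have hnout : out ≠ [] := by
        cases most with
        | true => exact pvStepB_ne_nil_most values (i:Int) hne
        | false =>
          obtain ⟨hn2', hsplit⟩ := hleast rfl
          obtain ⟨u, hu⟩ := List.exists_mem_of_ne_nil values hne
          have hgrp : 2 ≤ (values.filter (fun v => pvSeg v i i == pvSeg u i i)).length := by
            have hself : values.filter (fun v => pvSeg v i i == pvSeg u i i) = values := by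
              apply List.filter_eq_self.mpr; intro v _; simp [pvSeg]
            rw [hself]; exact hn2
          obtain ⟨w, hwv, _, hbw⟩ := hsplit i hiL (le_refl i) u hu hgrp
          rw [hbit u hu, hbit w hwv] at hbw
          rw [houtf]
          exact pvFilter_ne_nil_of_two values (fun v => pvBit v (i:Int)) _ w u hwv hu hbw
      by_cases hlone : out.length = 1
      · refine ⟨out, ?_, ?_⟩
        · rw [houtA, if_pos (by simpa using hlone)]
        · rw [houtB]
          simp only [pvLoopB]
          rw [if_pos (by simpa using hlone)]
      · -- recurse
        have hlout2 : 2 ≤ out.length := by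
          have : out.length ≠ 0 := by simpa using hnout
          omega
        have hlenout : ∀ v ∈ out, L ≤ v.toList.length := fun v hv =>
          hlen v (hsubout.mem hv)
        have hnd2 : (out.map (fun v => pvSeg v i L)).Nodup :=
          hnd.sublist (hsubout.map _)
        have hconsmap : out.map (fun v => pvSeg v i L)
            = (out.map (fun v => pvSeg v (i+1) L)).map
                (fun l => (if most then decide (2 * values.countP (fun v => pvBit v (i:Int)) ≥ values.length)
                  else decide (2 * values.countP (fun v => pvBit v (i:Int)) < values.length)) :: l) := by
          rw [List.map_map]
          apply List.map_congr_left
          intro v hv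
          have hvv : v ∈ values := hsubout.subset hv
          show pvSeg v i L = _ :: pvSeg v (i+1) L
          rw [pvSeg_cons v i L hiL (lt_of_lt_of_le hiL (hlen v hvv))]
          congr 1
          rw [hbit v hvv, hkmem v hv]
        have hndout : (out.map (fun v => pvSeg v (i+1) L)).Nodup := by
          apply List.Nodup.of_map _ (hconsmap ▸ hnd2)
        have hi1L : i + 1 < L := by
          by_contra hge
          obtain ⟨a, ha, b, hb, hab⟩ := pvTwo_ne out _ hndout hlout2
          apply hab
          have hL1 : L - (i + 1) = 0 := by omega
          simp [pvSeg, hL1]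
        have hleastout : most = false → 2 ≤ out.length ∧
            (∀ j < L, i + 1 ≤ j → ∀ u ∈ out,
              2 ≤ (out.filter (fun v => pvSeg v (i+1) j == pvSeg u (i+1) j)).length →
              ∃ v ∈ out, pvSeg v (i+1) j = pvSeg u (i+1) j ∧ pvBitN v j ≠ pvBitN u j) := by
          intro hmf
          obtain ⟨_, hsplit⟩ := hleast hmf
          refine ⟨hlout2, ?_⟩
          intro j hjL hij u hu hcard
          have hui : u ∈ values := hsubout.subset hu
          have hKu := hkmem u hu
          have hsu : pvSeg u i j = pvBitN u i :: pvSeg u (i+1) j :=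
            pvSeg_cons u i j (by omega) (lt_of_lt_of_le hiL (hlen u hui))
          have hfe : out.filter (fun v => pvSeg v (i+1) j == pvSeg u (i+1) j)
              = values.filter (fun v => pvSeg v i j == pvSeg u i j) := by
            rw [houtf, List.filter_filter]
            apply List.filter_congr
            intro v hv
            have hsv : pvSeg v i j = pvBitN v i :: pvSeg v (i+1) j :=
              pvSeg_cons v i j (by omega) (lt_of_lt_of_le hiL (hlen v hv))
            rw [hsv, hsu, List.cons_beq_cons, hbit v hv, hbit u hui, hKu]
            cases pvBit v (i:Int) <;> cases (pvSeg v (i+1) j == pvSeg u (i+1) j) <;> simp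
          rw [hfe] at hcard
          obtain ⟨w, hwv, hseg, hbne⟩ := hsplit j hjL (by omega) u hui hcard
          have hsw : pvSeg w i j = pvBitN w i :: pvSeg w (i+1) j :=
            pvSeg_cons w i j (by omega) (lt_of_lt_of_le hiL (hlen w hwv))
          rw [hsw, hsu] at hseg
          injection hseg with hh ht
          have hwout : w ∈ out := by
            rw [houtf]
            refine List.mem_filter.mpr ⟨hwv, ?_⟩
            rw [show pvBit w (i:Int) = pvBitN w i from (hbit w hwv).symm, hh,
               hbit u hui, hKu]
            simp
          exact ⟨w, hwout, ht, hbne⟩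
        obtain ⟨r, hA, hB⟩ := ih out most (i+1) L hnout hi1L hlenout hndout hleastout (by omega)
        have hcast : ((i + 1 : Nat) : Int) = (i : Int) + 1 := by push_cast; ring
        rw [hcast] at hA hB
        refine ⟨r, ?_, ?_⟩
        · rw [houtA, if_neg (by simpa using hlone)]; exact hA
        · rw [houtB]; exact hB

theorem pvNeg : ∀ (f : Nat) (values : List String) (ind : Int) (L : Nat),
    values ≠ [] → ind < 0 → -(L : Int) ≤ ind → (∀ v ∈ values, L ≤ v.toList.length) →
    (values.map (fun v => pvSeg v 0 L)).Nodup →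
    ((L : Int) - ind).toNat ≤ f →
    ∃ r, pvLoopA f values true ind = some r ∧ pvLoopB (f + 1) values true ind = some r := by
  intro f
  induction f with
  | zero => intro values ind L _ h2 h3 _ _ h6; omega
  | succ f ih =>
    intro values ind L hne hneg hgeL hlen hnd hfuel
    by_cases hone : values.length = 1
    · obtain ⟨v, rfl⟩ := List.length_eq_one_iff.mp hone
      refine ⟨[v], ?_, ?_⟩
      · simp [pvLoopA, pvStep_eq, pvStepB_singleton]
      · simp [pvLoopB]
    · have hn2 : 2 ≤ values.length := by
        have : values.length ≠ 0 := by simpa using hne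
        omega
      have houtA : pvLoopA (f + 1) values true ind
          = (if (pvStepB values true ind).length == 1 then some (pvStepB values true ind)
             else pvLoopA f (pvStepB values true ind) true (ind + 1)) := by
        simp only [pvLoopA, pvStep_eq]
      have houtB : pvLoopB (f + 1 + 1) values true ind
          = pvLoopB (f + 1) (pvStepB values true ind) true (ind + 1) := by
        simp only [pvLoopB]
        rw [if_neg (by simpa using hone)]
      set out := pvStepB values true ind with hout
      have hsubout : out.Sublist values := by
        rw [hout]; unfold pvStepB; exact List.filter_sublist
      have hnout : out ≠ [] := pvStepB_ne_nil_most values ind hne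
      have hlenout : ∀ v ∈ out, L ≤ v.toList.length := fun v hv => hlen v (hsubout.subset hv)
      have hndout : (out.map (fun v => pvSeg v 0 L)).Nodup := hnd.sublist (hsubout.map _)
      by_cases hlone : out.length = 1
      · refine ⟨out, ?_, ?_⟩
        · rw [houtA, if_pos (by simpa using hlone)]
        · rw [houtB]
          simp only [pvLoopB]
          rw [if_pos (by simpa using hlone)]
      · have hlout2 : 2 ≤ out.length := by
          have : out.length ≠ 0 := by simpa using hnout
          omega
        by_cases hz : ind + 1 < 0
        · obtain ⟨r, hA, hB⟩ := ih out (ind + 1) L hnout hz (by omega) hlenout hndout (by omega)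
          refine ⟨r, ?_, ?_⟩
          · rw [houtA, if_neg (by simpa using hlone)]; exact hA
          · rw [houtB]; exact hB
        · have hz0 : ind + 1 = ((0 : Nat) : Int) := by push_cast; omega
          have h0L : (0 : Nat) < L := by omega
          obtain ⟨r, hA, hB⟩ := pvMain f out true 0 L hnout h0L hlenout hndout
            (by intro h; cases h) (by omega)
          refine ⟨r, ?_, ?_⟩
          · rw [houtA, if_neg (by simpa using hlone), hz0]; exact hA
          · rw [houtB, hz0]; exact hB

theorem pvFoldMax_init : ∀ (l : List String) (m : Nat),
    m ≤ l.foldl (fun a s => max a s.toList.length) m := by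
  intro l
  induction l with
  | nil => simp
  | cons a t ih =>
    intro m
    calc m ≤ max m a.toList.length := le_max_left _ _
    _ ≤ _ := ih _

theorem pvFoldMax_mem : ∀ (l : List String) (m : Nat) (v : String), v ∈ l →
    v.toList.length ≤ l.foldl (fun a s => max a s.toList.length) m := by
  intro l
  induction l with
  | nil => intro m v hv; simp at hv
  | cons a t ih =>
    intro m v hv
    rcases List.mem_cons.mp hv with h | h
    · subst h
      calc v.toList.length ≤ max m v.toList.length := le_max_right _ _
      _ ≤ _ := pvFoldMax_init _ _
    · exact ih _ v h

theorem pvFoldMin_init : ∀ (l : List String) (m : Nat),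
    l.foldl (fun a s => min a s.toList.length) m ≤ m := by
  intro l
  induction l with
  | nil => simp
  | cons a t ih =>
    intro m
    calc t.foldl (fun a s => min a s.toList.length) (min m a.toList.length)
        ≤ min m a.toList.length := ih _
    _ ≤ m := min_le_left _ _

theorem pvFoldMin_mem' : ∀ (l : List String) (m : Nat) (v : String), v ∈ l →
    l.foldl (fun a s => min a s.toList.length) m ≤ v.toList.length := by
  intro l
  induction l with
  | nil => intro m v hv; simp at hv
  | cons a t ih =>
    intro m v hv
    rcases List.mem_cons.mp hv with h | h
    · subst h
      calc t.foldl (fun a s => min a s.toList.length) (min m v.toList.length)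
          ≤ min m v.toList.length := pvFoldMin_init _ _
      _ ≤ v.toList.length := min_le_right _ _
    · exact ih _ v h

theorem pvFoldMin_mem (values : List String) (v : String) (hv : v ∈ values) :
    pvLenMin values ≤ v.toList.length :=
  pvFoldMin_mem' values _ v hv

theorem pvLenMin_single (v : String) : pvLenMin [v] = v.toList.length := by
  simp [pvLenMin]

-- ===== VERDICT (by name: the statement is the Claim_ definition above) =====
theorem filter_to_last_spec : Claim_equal_filter_to_last := by
  intro values most ind _hdom hpre
  unfold Spec_filter_to_last
  unfold filter_to_last filter_to_last_alt pvFuel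
  rcases hpre with ⟨hne, _hval, hout1⟩ | ⟨hne, hlt, hge, hnd, hleast⟩
  · -- the first partition already isolates a single code
    have hstep1 : (pvStepB values most ind).length = 1 := by
      rw [pvStepB_len]; exact hout1
    have hA : pvLoopA (values.foldl (fun m v => max m v.toList.length) 0 + ind.natAbs + 1)
        values most ind = some (pvStepB values most ind) := by
      simp only [pvLoopA, pvStep_eq]
      rw [if_pos (by simpa using hstep1)]
    have hB : pvLoopB (values.foldl (fun m v => max m v.toList.length) 0 + ind.natAbs + 1 + 1)
        values most ind = some (pvStepB values most ind) := by
      by_cases h1 : values.length = 1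
      · have hsub : (pvStepB values most ind).Sublist values := by
          unfold pvStepB; exact List.filter_sublist
        have heq : pvStepB values most ind = values := hsub.eq_of_length (by omega)
        simp only [pvLoopB]
        rw [if_pos (by simpa using h1), heq]
      · simp only [pvLoopB]
        rw [if_neg (by simpa using h1), if_pos (by simpa using hstep1)]
    rw [hA, hB]
  · -- the clean diagnostic case
    set F := values.foldl (fun m v => max m v.toList.length) 0 + ind.natAbs + 1 with hF
    have hlen : ∀ v ∈ values, pvLenMin values ≤ v.toList.length :=
      fun v hv => pvFoldMin_mem values v hv
    have hLmax : pvLenMin values ≤ values.foldl (fun a s => max a s.toList.length) 0 := by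
      obtain ⟨v, t, rfl⟩ := List.exists_cons_of_ne_nil hne
      calc pvLenMin (v :: t) ≤ v.toList.length := pvFoldMin_mem _ _ List.mem_cons_self
      _ ≤ _ := pvFoldMax_mem _ _ _ List.mem_cons_self
    by_cases hpos : 0 ≤ ind
    · have hi : ind = (ind.toNat : Int) := (Int.toNat_of_nonneg hpos).symm
      have hiL : ind.toNat < pvLenMin values := by omega
      obtain ⟨r, hA, hB⟩ := pvMain F values most ind.toNat (pvLenMin values) hne hiL hlen hnd
        (fun h => ⟨(hleast h).2.1, (hleast h).2.2⟩) (by omega)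
      rw [hi, hA, hB]
    · push_neg at hpos
      cases most with
      | false =>
        obtain ⟨h0, _, _⟩ := hleast rfl
        omega
      | true =>
        have hnd0 : (values.map (fun v => pvSeg v 0 (pvLenMin values))).Nodup := by
          have h0 : ind.toNat = 0 := by omega
          rw [h0] at hnd
          exact hnd
        obtain ⟨r, hA, hB⟩ := pvNeg F values ind (pvLenMin values) hne hpos hge hlen hnd0 (by omega)
        rw [hA, hB]

theorem filter_to_last_raises : Claim_raises_filter_to_last := by
  unfold Claim_raises_filter_to_last
  refine ⟨?_, by decide⟩
  intro values most ind _hdom hr hpre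
  obtain ⟨hlen1, hcase⟩ := hr
  obtain ⟨v, rfl⟩ := List.length_eq_one_iff.mp hlen1
  have hhd : ([v].headD "") = v := rfl
  rcases hpre with ⟨_, hval, hout1⟩ | ⟨_, hlt, hge, _, hleast⟩
  · have hv := hval v List.mem_cons_self
    have hc : [v].countP (fun w => PySem.Str.pyGet? w ind == some '1') ≤ 1 := by
      simpa using List.countP_le_length (l := [v]) (p := fun w => PySem.Str.pyGet? w ind == some '1')
    rcases hcase with hm | hrange
    · rw [hm] at hout1
      simp only [Bool.false_eq_true, if_false, List.length_singleton] at hout1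
      split_ifs at hout1 <;> omega
    · exact hrange ⟨by simpa [hhd] using hv.1, by simpa [hhd] using hv.2⟩
  · rw [pvLenMin_single] at hlt hge
    rcases hcase with hm | hrange
    · have := (hleast hm).2.1
      simp at this
    · exact hrange ⟨by simpa [hhd] using hge, by simpa [hhd] using hlt⟩

-- witness self-check: B's port really returns the stated value where A raises
theorem pvRaiseWitness_ok :
    filter_to_last_alt (pvRaiseWitness_filter_to_last.1) (pvRaiseWitness_filter_to_last.2.1)
      (pvRaiseWitness_filter_to_last.2.2) = pvRaiseWitnessOut_filter_to_last := by
  have h := filter_to_last_raises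
  unfold Claim_raises_filter_to_last at h
  exact h.2.2.2
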